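-- pv_equiv track=rewrite | github.com/langgenius/dify | api/libs/pyrefly_diagnostics.py | extract_diagnostics
-- ===== SOURCE A (Python) =====
-- _DIAGNOSTIC_PREFIXES = ("ERROR ", "WARNING ")
--
-- _LOCATION_PREFIX = "-->"
--
-- def extract_diagnostics(raw_output: str) -> str:
--     """Extract stable diagnostic lines from pyrefly output.
--
--     The full pyrefly output includes code excerpts and carets, which create noisy
--     diffs. This helper keeps only:
--     - diagnostic headline lines (``ERROR ...`` / ``WARNING ...``)
--     - the following location line (``--> path:line:column``), when present
--     """
--
--     lines = raw_output.splitlines()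
--     diagnostics: list[str] = []
--
--     for index, line in enumerate(lines):
--         if line.startswith(_DIAGNOSTIC_PREFIXES):
--             diagnostics.append(line.rstrip())
--
--             next_index = index + 1
--             if next_index < len(lines):
--                 next_line = lines[next_index]
--                 if next_line.lstrip().startswith(_LOCATION_PREFIX):
--                     diagnostics.append(next_line.rstrip())
--
--     if not diagnostics:
--         return ""
--
--     return "\n".join(diagnostics) + "\n"
-- ===== SOURCE B (Python) =====
-- _DIAGNOSTIC_PREFIXES = ("ERROR ", "WARNING ")
--
-- _LOCATION_PREFIX = "-->"
--
--
-- def extract_diagnostics(raw_output: str) -> str: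
--     """Single forward pass with a carried 'expect location' flag (no index lookahead)."""
--     diagnostics: list[str] = []
--     expect_location = False
--     for line in raw_output.splitlines():
--         if line.startswith(_DIAGNOSTIC_PREFIXES):
--             diagnostics.append(line.rstrip())
--             expect_location = True
--         elif expect_location and line.lstrip().startswith(_LOCATION_PREFIX):
--             diagnostics.append(line.rstrip())
--             expect_location = False
--         else:
--             expect_location = False
--     if not diagnostics:
--         return ""
--     return "\n".join(diagnostics) + "\n"
-- ===== Notes on version B (the rewrite author's own statement) =====
-- stated objective: alternative
-- what changed: Replaces A's enumerate-with-index-lookahead (peeking at lines[index+1] after each diagnostic) by a single forward pass carrying a boolean expect-location flag, so no indexing into the line list is needed.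
import Mathlib
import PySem

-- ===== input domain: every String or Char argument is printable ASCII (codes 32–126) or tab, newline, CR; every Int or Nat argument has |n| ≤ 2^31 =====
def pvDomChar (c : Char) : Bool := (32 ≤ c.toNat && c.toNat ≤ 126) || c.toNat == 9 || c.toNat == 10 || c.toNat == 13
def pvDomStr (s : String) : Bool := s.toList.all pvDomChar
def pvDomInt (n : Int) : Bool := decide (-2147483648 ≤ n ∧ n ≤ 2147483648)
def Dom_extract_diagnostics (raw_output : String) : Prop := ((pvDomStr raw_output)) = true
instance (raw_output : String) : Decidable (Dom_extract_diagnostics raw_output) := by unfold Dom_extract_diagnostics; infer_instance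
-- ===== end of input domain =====

-- B replaces A's enumerate-with-index-lookahead by a single forward pass carrying an
-- 'expect_location' boolean flag (alternative decomposition, same O(n) cost).


-- shared module-level constants of the Python file, as predicates:
-- line.startswith(_DIAGNOSTIC_PREFIXES) and line.lstrip().startswith(_LOCATION_PREFIX)
def pvIsDiagLine (line : String) : Bool :=
  PySem.Str.startswith line "ERROR " || PySem.Str.startswith line "WARNING "
def pvIsLocLine (line : String) : Bool :=
  PySem.Str.startswith (PySem.Str.lstrip line) "-->"

-- ===== PORT A =====
-- A's loop over enumerate(lines) peeks at lines[index+1]; in the recursion over the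
-- remaining lines that lookahead is rest.head? (= lines[next_index] when it exists).
def pvA_collect : List String → List String
  | [] => []
  | line :: rest =>
    if pvIsDiagLine line then
      PySem.Str.rstrip line ::
        (match rest.head? with
         | some next_line =>
             if pvIsLocLine next_line then
               PySem.Str.rstrip next_line :: pvA_collect rest
             else pvA_collect rest
         | none => pvA_collect rest)
    else pvA_collect rest

def extract_diagnostics (raw_output : String) : String :=
  let lines := PySem.Str.splitlines raw_output
  let diagnostics := pvA_collect lines
  if diagnostics.isEmpty then "" else PySem.Str.join "\n" diagnostics ++ "\n"

-- ===== PORT B =====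
def pvB_step (st : Bool × List String) (line : String) : Bool × List String :=
  if pvIsDiagLine line then (true, st.2 ++ [PySem.Str.rstrip line])
  else if st.1 && pvIsLocLine line then (false, st.2 ++ [PySem.Str.rstrip line])
  else (false, st.2)

def extract_diagnostics_alt (raw_output : String) : String :=
  match ((PySem.Str.splitlines raw_output).foldl pvB_step (false, [])).2 with
  | [] => ""
  | diagnostics => PySem.Str.join "\n" diagnostics ++ "\n"

-- ===== PRECONDITION & SPEC =====
def Spec_extract_diagnostics (raw_output : String) (out : String) : Prop := out = extract_diagnostics_alt raw_output
instance (raw_output : String) (out : String) : Decidable (Spec_extract_diagnostics raw_output out) := by unfold Spec_extract_diagnostics; infer_instance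

-- ===== CLAIM (what is proved, stated in full; the proofs are below) =====
def Claim_equal_extract_diagnostics : Prop := ∀ (raw_output : String), Dom_extract_diagnostics raw_output → Spec_extract_diagnostics raw_output (extract_diagnostics raw_output)

-- ===== LEMMAS AND PROOFS =====

-- the list B's fold collects, as a recursion on the lines with the flag explicit
def pvBC : Bool → List String → List String
  | _, [] => []
  | flag, line :: rest =>
    if pvIsDiagLine line then PySem.Str.rstrip line :: pvBC true rest
    else if flag && pvIsLocLine line then PySem.Str.rstrip line :: pvBC false rest
    else pvBC false rest

lemma pvB_foldl_eq (ls : List String) : ∀ (flag : Bool) (acc : List String),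
    (ls.foldl pvB_step (flag, acc)).2 = acc ++ pvBC flag ls := by
  induction ls with
  | nil => intro flag acc; simp [pvBC]
  | cons l rest ih =>
    intro flag acc
    simp only [List.foldl_cons, pvB_step, pvBC]
    by_cases hd : pvIsDiagLine l
    · simp [hd, ih]
    · by_cases hf : flag && pvIsLocLine l
      · simp [hd, hf, ih]
      · simp [hd, hf, ih]

-- a diagnostic headline is never a location line
lemma pvDiag_not_loc (l : String) (h : pvIsDiagLine l = true) : pvIsLocLine l = false := by
  simp only [pvIsDiagLine, Bool.or_eq_true] at h
  simp only [pvIsLocLine, PySem.Str.startswith_eq, PySem.Str.toList_lstrip,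
    PySem.Chars.startswith_iff] at *
  rcases h with h | h <;> obtain ⟨t, ht⟩ := h <;> rw [← ht] <;>
    simp [PySem.Chars.lstrip, PySem.Chars.isspace, PySem.Chars.startswith, List.isPrefixOf]

-- the location line A's lookahead would add before processing the rest
def pvExtra : List String → List String
  | [] => []
  | next_line :: _ =>
    if !pvIsDiagLine next_line && pvIsLocLine next_line then [PySem.Str.rstrip next_line] else []

lemma pvBC_eq_collect : ∀ ls : List String,
    pvBC false ls = pvA_collect ls ∧ pvBC true ls = pvExtra ls ++ pvA_collect ls := by
  intro ls
  induction ls with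
  | nil => simp [pvBC, pvA_collect, pvExtra]
  | cons l rest ih =>
    obtain ⟨ihf, iht⟩ := ih
    by_cases hd : pvIsDiagLine l
    · have key : pvBC true rest = pvExtra rest ++ pvA_collect rest := iht
      have hAeq : pvA_collect (l :: rest) = PySem.Str.rstrip l :: pvBC true rest := by
        rw [key]
        cases rest with
        | nil => simp [pvA_collect, hd, pvExtra]
        | cons m r =>
          by_cases hm : pvIsDiagLine m
          · simp [pvA_collect, hd, pvExtra, hm, pvDiag_not_loc m hm]
          · by_cases hl : pvIsLocLine m
            · simp [pvA_collect, hd, pvExtra, hm, hl]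
            · simp [pvA_collect, hd, pvExtra, hm, hl]
      constructor
      · simp [pvBC, hd, hAeq]
      · simp [pvBC, hd, hAeq, pvExtra, pvDiag_not_loc l hd]
    · constructor
      · simp [pvBC, hd, ihf, pvA_collect]
      · by_cases hl : pvIsLocLine l
        · simp [pvBC, hd, hl, ihf, pvExtra, pvA_collect]
        · simp [pvBC, hd, hl, ihf, pvExtra, pvA_collect]

-- ===== VERDICT (by name: the statement is the Claim_ definition above) =====
theorem extract_diagnostics_spec : Claim_equal_extract_diagnostics := by
  intro raw_output _
  unfold Spec_extract_diagnostics extract_diagnostics extract_diagnostics_alt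
  rw [pvB_foldl_eq, List.nil_append, (pvBC_eq_collect (PySem.Str.splitlines raw_output)).1]
  cases h : pvA_collect (PySem.Str.splitlines raw_output) with
  | nil => simp [h]
  | cons a t => simp [h]
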